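-- pv_equiv track=rewrite | github.com/dshap474/numereng | src/numereng/features/training/_pipeline.py | _ordered_emitted_stage_files
-- ===== SOURCE A (Python) =====
-- _EMITTED_STAGE_FILE_ORDER = (
--     "run_metric_series",
--     "post_fold_per_era",
--     "post_fold_snapshots",
--     "post_training_core_summary",
--     "post_training_full_summary",
-- )
--
-- def _ordered_emitted_stage_files(values: object) -> list[str]:
--     if not isinstance(values, list) and not hasattr(values, "__iter__"):
--         return []
--     resolved = [str(value) for value in values]
--     remaining = set(resolved)
--     ordered: list[str] = []
--     for item in _EMITTED_STAGE_FILE_ORDER: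
--         if item in remaining:
--             ordered.append(item)
--             remaining.remove(item)
--     ordered.extend(sorted(remaining))
--     return ordered
-- ===== SOURCE B (Python) =====
-- _EMITTED_STAGE_FILE_ORDER = (
--     "run_metric_series",
--     "post_fold_per_era",
--     "post_fold_snapshots",
--     "post_training_core_summary",
--     "post_training_full_summary",
-- )
--
-- def _ordered_emitted_stage_files(values: object) -> list[str]:
--     if not isinstance(values, list) and not hasattr(values, "__iter__"):
--         return []
--     rank = {name: i for i, name in enumerate(_EMITTED_STAGE_FILE_ORDER)}
--     sentinel = len(_EMITTED_STAGE_FILE_ORDER)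
--     return sorted({str(v) for v in values}, key=lambda s: (rank.get(s, sentinel), s))
-- ===== Notes on version B (the rewrite author's own statement) =====
-- stated objective: simpler
-- what changed: A's pick-loop over the priority tuple (append + set-remove) followed by sorting the leftover set is replaced by a single sort of the deduplicated input under a (rank, name) key, with ranks read from a dict built once from the priority tuple.
import Mathlib
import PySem

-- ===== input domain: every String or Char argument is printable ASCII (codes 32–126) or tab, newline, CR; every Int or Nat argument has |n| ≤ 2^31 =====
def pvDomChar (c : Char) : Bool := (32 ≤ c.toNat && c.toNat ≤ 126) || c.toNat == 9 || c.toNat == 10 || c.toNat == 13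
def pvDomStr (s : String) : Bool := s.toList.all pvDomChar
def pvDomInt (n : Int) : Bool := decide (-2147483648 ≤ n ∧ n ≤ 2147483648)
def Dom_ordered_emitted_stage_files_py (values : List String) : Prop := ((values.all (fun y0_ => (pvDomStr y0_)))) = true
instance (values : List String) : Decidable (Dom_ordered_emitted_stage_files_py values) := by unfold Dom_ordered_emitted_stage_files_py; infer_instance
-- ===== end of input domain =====

-- B replaces A's pick-then-sort-the-rest loop by one sort of the deduplicated input under a
-- (rank, name) key, rank read from a dict built from the priority tuple (objective: simpler).
-- The equivalence is about the RETURN value; neither version mutates its argument.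

-- _EMITTED_STAGE_FILE_ORDER (module constant, shared by both ports)
def pvStageOrder : List String :=
  ["run_metric_series", "post_fold_per_era", "post_fold_snapshots",
   "post_training_core_summary", "post_training_full_summary"]

-- ===== PORT A =====
-- The isinstance/hasattr guard never fires for a list argument (the only type admitted here),
-- and str(value) on a str is the identity, kept as the literal map below.
-- 'remaining.remove(item)' runs only under the membership guard, where it equals Set.discard.
def ordered_emitted_stage_files_py (values : List String) : List String :=
  let resolved : List String := values.map (fun value => value)
  let st := pvStageOrder.foldl
    (fun (st : List String × PySem.Set String) item =>
      if PySem.Set.contains st.2 item then (st.1 ++ [item], PySem.Set.discard st.2 item) else st)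
    ([], PySem.Set.ofList resolved)
  st.1 ++ PySem.List.sorted st.2 (fun x => x) false

-- ===== PORT B =====
-- rank = {name: i for i, name in enumerate(_EMITTED_STAGE_FILE_ORDER)}; sentinel = len(...);
-- sorted({str(v) for v in values}, key=lambda s: (rank.get(s, sentinel), s)).
def ordered_emitted_stage_files_py_alt (values : List String) : List String :=
  let rank : PySem.Dict String Int :=
    (PySem.List.enumerate pvStageOrder).foldl (fun d p => d.insert p.2 p.1) PySem.Dict.empty
  let sentinel : Int := PySem.List.len pvStageOrder
  PySem.List.sorted2 (PySem.Set.ofList (values.map (fun value => value)))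
    (fun s => rank.getD s sentinel) (fun s => s) false

-- ===== PRECONDITION & SPEC =====
def Spec_ordered_emitted_stage_files_py (values : List String) (out : List String) : Prop := out = ordered_emitted_stage_files_py_alt values
instance (values : List String) (out : List String) : Decidable (Spec_ordered_emitted_stage_files_py values out) := by unfold Spec_ordered_emitted_stage_files_py; infer_instance

-- ===== CLAIM (what is proved, stated in full; the proofs are below) =====
def Claim_equal_ordered_emitted_stage_files_py : Prop := ∀ (values : List String), Dom_ordered_emitted_stage_files_py values → Spec_ordered_emitted_stage_files_py values (ordered_emitted_stage_files_py values)

-- ===== LEMMAS AND PROOFS =====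

-- B's rank lookup as a named function (proof helper only)
def pvRank (s : String) : Int :=
  ((PySem.List.enumerate pvStageOrder).foldl (fun d p => d.insert p.2 p.1)
    PySem.Dict.empty).getD s 5

lemma pvRank_lt_of_mem {a : String} (h : a ∈ pvStageOrder) : pvRank a < 5 := by
  fin_cases h <;> decide

lemma pvRank_of_not_mem {a : String} (h : a ∉ pvStageOrder) : pvRank a = 5 := by
  simp only [pvStageOrder, List.mem_cons, List.not_mem_nil, or_false, not_or] at h
  obtain ⟨h1, h2, h3, h4, h5⟩ := h
  show (((((PySem.Dict.empty.insert "run_metric_series" 0).insert "post_fold_per_era" 1).insert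
      "post_fold_snapshots" 2).insert "post_training_core_summary" 3).insert
      "post_training_full_summary" 4).getD a 5 = 5
  simp [PySem.Dict.getD_insert, h1, h2, h3, h4, h5, PySem.Dict.getD_empty]

lemma pvRank_pairwise : pvStageOrder.Pairwise (fun a b => pvRank a < pvRank b) := by decide

lemma pvStageOrder_nodup : pvStageOrder.Nodup := by decide

-- A's priority loop, characterised: picked prefix and leftover set
lemma pvFoldA (o : List String) (acc s : List String) (ho : o.Nodup) :
    o.foldl
      (fun (st : List String × PySem.Set String) item =>
        if PySem.Set.contains st.2 item then (st.1 ++ [item], PySem.Set.discard st.2 item) else st)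
      (acc, s)
    = (acc ++ o.filter (fun i => s.contains i), s.filter (fun x => !o.contains x)) := by
  induction o generalizing acc s with
  | nil => simp
  | cons i o' ih =>
    obtain ⟨hio', ho'⟩ := List.nodup_cons.mp ho
    rw [List.foldl_cons]
    by_cases h : PySem.Set.contains s i
    · rw [if_pos h, ih _ _ ho', Prod.mk.injEq]
      have hc : s.contains i = true := by simpa [PySem.Set.contains] using h
      have hmem : i ∈ s := by simpa using hc
      constructor
      · rw [List.filter_congr (l := o') (q := fun j => s.contains j)
          (fun j hj => by
            have hji : j ≠ i := fun e => hio' (e ▸ hj)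
            simp [PySem.Set.discard, hji])]
        simp [hmem, List.append_assoc]
      · simp only [PySem.Set.discard, List.filter_filter]
        apply List.filter_congr
        intro x _
        by_cases hxi : x = i <;> simp [hxi, Bool.and_comm]
    · rw [if_neg h, ih _ _ ho', Prod.mk.injEq]
      have hi : i ∉ s := by simpa [PySem.Set.contains] using h
      constructor
      · simp [hi]
      · apply List.filter_congr
        intro x hx
        have hxi : x ≠ i := fun e => hi (e ▸ hx)
        simp [hxi]

-- sorted2 with an (Int, String) key is sorted under the lexicographic key
lemma pvSorted2_eq_sorted_toLex (xs : List String) (k1 : String → Int) (k2 : String → String) :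
    PySem.List.sorted2 xs k1 k2 false
      = PySem.List.sorted xs (fun x => toLex (k1 x, k2 x)) false := by
  rw [PySem.List.sorted_eq_foldl_insertBy]
  simp only [PySem.List.sorted2]
  have hfun : (fun a b => decide (k1 a < k1 b) || (!decide (k1 b < k1 a) && decide (k2 a < k2 b)))
      = (fun a b => decide ((toLex (k1 a, k2 a) : Lex (Int × String)) < toLex (k1 b, k2 b))) := by
    funext a b
    rcases lt_trichotomy (k1 a) (k1 b) with hlt | heq | hgt
    · simp [Prod.Lex.lt_iff, hlt]
    · simp [Prod.Lex.lt_iff, heq]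
    · simp [Prod.Lex.lt_iff, hgt, not_lt_of_gt hgt, ne_of_gt hgt]
  rw [hfun]
  simp

-- ===== VERDICT (by name: the statement is the Claim_ definition above) =====
theorem ordered_emitted_stage_files_py_spec : Claim_equal_ordered_emitted_stage_files_py := by
  intro values _
  unfold Spec_ordered_emitted_stage_files_py
  unfold ordered_emitted_stage_files_py ordered_emitted_stage_files_py_alt
  simp only [List.map_id']
  set S : List String := PySem.Set.ofList values with hS
  have hSnd : S.Nodup := PySem.Set.nodup_ofList values
  rw [pvFoldA pvStageOrder [] S pvStageOrder_nodup]
  show (pvStageOrder.filter (fun i => S.contains i)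
      ++ PySem.List.sorted (S.filter (fun x => !pvStageOrder.contains x)) (fun x => x) false)
      = PySem.List.sorted2 S (fun s => _) (fun s => s) false
  rw [show PySem.List.len pvStageOrder = 5 from rfl]
  rw [pvSorted2_eq_sorted_toLex S _ (fun s => s)]
  set P := pvStageOrder.filter (fun i => S.contains i) with hP
  set R := S.filter (fun x => !pvStageOrder.contains x) with hR
  set Q := PySem.List.sorted R (fun x => x) false with hQ
  have hkey : ∀ s, ((PySem.List.enumerate pvStageOrder).foldl (fun d p => d.insert p.2 p.1)
      PySem.Dict.empty).getD s 5 = pvRank s := fun s => rfl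
  have hQperm : Q.Perm R := PySem.List.sorted_perm R _ _
  -- membership facts
  have hmemP : ∀ {x}, x ∈ P → x ∈ pvStageOrder ∧ x ∈ S := by
    intro x hx; rw [hP, List.mem_filter] at hx
    exact ⟨hx.1, by simpa using hx.2⟩
  have hmemR : ∀ {x}, x ∈ R → x ∈ S ∧ x ∉ pvStageOrder := by
    intro x hx; rw [hR, List.mem_filter] at hx
    exact ⟨hx.1, by simpa using hx.2⟩
  have hmemQ : ∀ {x}, x ∈ Q → x ∈ S ∧ x ∉ pvStageOrder := fun hx => hmemR (hQperm.mem_iff.mp hx)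
  symm
  apply PySem.List.sorted_eq_of_perm_of_pairwise_lt
  · -- (P ++ Q).Perm S
    have h1 : (P ++ Q).Perm (P ++ R) := List.Perm.append_left P hQperm
    have hPnd : P.Nodup := List.Nodup.filter _ pvStageOrder_nodup
    have hFnd : (S.filter (fun x => pvStageOrder.contains x)).Nodup := List.Nodup.filter _ hSnd
    have h2 : P.Perm (S.filter (fun x => pvStageOrder.contains x)) := by
      rw [List.perm_ext_iff_of_nodup hPnd hFnd]
      intro a
      rw [hP, List.mem_filter, List.mem_filter]
      constructor
      · rintro ⟨ha, hc⟩; exact ⟨by simpa using hc, by simpa using ha⟩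
      · rintro ⟨ha, hc⟩; exact ⟨by simpa using hc, by simpa using ha⟩
    have h3 : (P ++ R).Perm ((S.filter (fun x => pvStageOrder.contains x)) ++ R) :=
      List.Perm.append_right R h2
    have h4 := List.filter_append_perm (fun x => pvStageOrder.contains x) S
    exact (h1.trans h3).trans h4
  · -- Pairwise strict key increase on P ++ Q
    rw [List.pairwise_append]
    refine ⟨?_, ?_, ?_⟩
    · -- inside P: ranks strictly increase along pvStageOrder
      have := List.Pairwise.filter (fun i => S.contains i) pvRank_pairwise
      refine this.imp ?_
      intro a b hab
      exact Prod.Lex.lt_iff.mpr (Or.inl (by simpa [hkey] using hab))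
    · -- inside Q: nodup & sorted ⇒ strictly increasing strings, all with rank 5
      have hle : Q.Pairwise (fun a b => a ≤ b) := by
        simpa using PySem.List.sorted_pairwise R (fun x => x)
      have hRnd : R.Nodup := by rw [hR]; exact List.Nodup.filter _ hSnd
      have hnd : Q.Nodup := hQperm.symm.nodup hRnd
      have hlt : Q.Pairwise (fun a b : String => a < b) :=
        (hle.and hnd).imp (fun h => lt_of_le_of_ne h.1 h.2)
      refine hlt.imp_of_mem ?_
      intro a b ha hb hab
      refine Prod.Lex.lt_iff.mpr (Or.inr ⟨?_, hab⟩)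
      simp [hkey, pvRank_of_not_mem (hmemQ ha).2, pvRank_of_not_mem (hmemQ hb).2]
    · -- across: every priority name outranks every leftover
      intro a ha b hb
      refine Prod.Lex.lt_iff.mpr (Or.inl ?_)
      have h5 := pvRank_of_not_mem (hmemQ hb).2
      have hlt5 := pvRank_lt_of_mem (hmemP ha).1
      simpa [hkey, h5] using hlt5
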